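-- pv_equiv track=rewrite | github.com/Jsena121/Python-Practice | allMyCats3.py | list2String
-- ===== SOURCE A (Python) =====
-- def list2String(inputList):
--     resultString = ''
--     for x in range(len(inputList)):
--         if x != len(inputList)-1 and len(inputList)!=0:
--             resultString += str(inputList[x]) + ', '
--         elif x == len(inputList) - 1 and len(inputList) !=0 and len(inputList)!=1:
--             resultString += 'and ' + str(inputList[x])
--         elif len(inputList) == 1:
--             resultString = str(inputList[x])
--     return resultString
-- ===== SOURCE B (Python) =====
-- def list2String(inputList):
--     if not inputList:
--         return ''
--     if len(inputList) == 1: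
--         return str(inputList[0])
--     return ', '.join(str(x) for x in inputList[:-1]) + ', and ' + str(inputList[-1])
-- ===== Notes on version B (the rewrite author's own statement) =====
-- stated objective: simpler
-- what changed: Replaced the index loop with a per-index three-way branch by two guard clauses (empty, singleton) plus a single ', '-join of all-but-last followed by ', and ' + last; no loop-carried accumulator or per-element branching remains.
import Mathlib
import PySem

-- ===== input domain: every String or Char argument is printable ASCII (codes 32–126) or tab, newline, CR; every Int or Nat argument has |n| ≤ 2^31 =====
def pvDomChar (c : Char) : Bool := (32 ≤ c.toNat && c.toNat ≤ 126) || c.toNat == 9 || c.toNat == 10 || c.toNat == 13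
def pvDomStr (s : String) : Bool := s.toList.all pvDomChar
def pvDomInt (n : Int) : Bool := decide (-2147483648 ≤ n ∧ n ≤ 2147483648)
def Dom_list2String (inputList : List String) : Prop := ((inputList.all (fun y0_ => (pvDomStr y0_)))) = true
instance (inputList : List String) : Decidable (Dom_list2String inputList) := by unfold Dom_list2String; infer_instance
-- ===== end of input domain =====

-- B replaces A's index loop with a per-index three-way branch by two endpoint guard clauses plus one ', '-join of all-but-last (simpler decomposition, same output).
-- ===== PORT A =====
-- indices x drawn from range(len(inputList)) are always in range, so pyGetD's default "" is never used
def list2String (inputList : List String) : String :=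
  let n : Int := inputList.length
  (PySem.List.pyRange 0 n 1).foldl (fun resultString x =>
    if x ≠ n - 1 ∧ n ≠ 0 then
      resultString ++ (PySem.List.pyGetD inputList x "" ++ ", ")
    else if x = n - 1 ∧ n ≠ 0 ∧ n ≠ 1 then
      resultString ++ ("and " ++ PySem.List.pyGetD inputList x "")
    else if n = 1 then
      PySem.List.pyGetD inputList x ""
    else resultString) ""

-- ===== PORT B =====
def list2String_alt (inputList : List String) : String :=
  match inputList with
  | [] => ""
  | [x] => x
  | x :: y :: t =>
      PySem.Str.join ", " (x :: y :: t).dropLast ++ ", and " ++ (x :: y :: t).getLast (by simp)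

-- ===== PRECONDITION & SPEC =====
def Spec_list2String (inputList : List String) (out : String) : Prop := out = list2String_alt inputList
instance (inputList : List String) (out : String) : Decidable (Spec_list2String inputList out) := by unfold Spec_list2String; infer_instance

-- ===== CLAIM (what is proved, stated in full; the proofs are below) =====
def Claim_equal_list2String : Prop := ∀ (inputList : List String), Dom_list2String inputList → Spec_list2String inputList (list2String inputList)

-- ===== LEMMAS AND PROOFS =====

-- The string A's loop appends after having consumed the first k elements, as a function of the remaining suffix (n ≥ 2 case).
def tailStr : List String → String
  | [] => ""
  | [a] => "and " ++ a
  | a :: b :: t => a ++ ", " ++ tailStr (b :: t)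

lemma loopA (l : List String) (h2 : 2 ≤ l.length) :
    ∀ (k : Nat) (acc : String), k ≤ l.length →
      (PySem.List.pyRange k l.length 1).foldl (fun resultString x =>
        if x ≠ (l.length : Int) - 1 ∧ (l.length : Int) ≠ 0 then
          resultString ++ (PySem.List.pyGetD l x "" ++ ", ")
        else if x = (l.length : Int) - 1 ∧ (l.length : Int) ≠ 0 ∧ (l.length : Int) ≠ 1 then
          resultString ++ ("and " ++ PySem.List.pyGetD l x "")
        else if (l.length : Int) = 1 then
          PySem.List.pyGetD l x ""
        else resultString) acc = acc ++ tailStr (l.drop k) := by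
  intro k
  induction hk : l.length - k generalizing k with
  | zero =>
      intro acc hle
      have hk' : k = l.length := by omega
      subst hk'
      rw [PySem.List.pyRange_one_eq_nil (by exact_mod_cast le_refl _)]
      simp [tailStr]
  | succ m ih =>
      intro acc hle
      have hklt : k < l.length := by omega
      rw [PySem.List.pyRange_one_cons (by exact_mod_cast hklt)]
      simp only [List.foldl]
      have hget : PySem.List.pyGetD l (k : Int) "" = l[k]'hklt := by
        rw [PySem.List.pyGetD_eq_getElem l "" (by positivity) (by exact_mod_cast hklt)]
        simp
      by_cases hlast : k = l.length - 1
      · -- last index: second branch fires, and the remaining range is empty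
        have h1 : ¬ ((k : Int) ≠ (l.length : Int) - 1 ∧ (l.length : Int) ≠ 0) := by
          push Not; intro h; exfalso; apply h; omega
        have h2' : (k : Int) = (l.length : Int) - 1 ∧ (l.length : Int) ≠ 0 ∧ (l.length : Int) ≠ 1 := by
          refine ⟨by omega, by omega, by omega⟩
        rw [if_neg h1, if_pos h2']
        rw [PySem.List.pyRange_one_eq_nil (by omega)]
        have hdrop : l.drop k = [l[k]'hklt] := by
          have := List.drop_eq_getElem_cons hklt
          rw [this]
          have : l.drop (k + 1) = [] := by
            rw [List.drop_eq_nil_iff]; omega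
          rw [this]
        simp [hdrop, tailStr, hget]
      · -- interior index: first branch fires
        have h1 : (k : Int) ≠ (l.length : Int) - 1 ∧ (l.length : Int) ≠ 0 := by
          constructor <;> omega
        rw [if_pos h1]
        have hm : l.length - (k + 1) = m := by omega
        have hih := ih (k + 1) hm (acc ++ (PySem.List.pyGetD l (k : Int) "" ++ ", ")) (by omega)
        push_cast at hih
        rw [hih]
        have hdrop : l.drop k = l[k]'hklt :: l.drop (k + 1) := List.drop_eq_getElem_cons hklt
        have hne : l.drop (k + 1) ≠ [] := by
          rw [← List.length_pos_iff, List.length_drop]; omega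
        obtain ⟨b, t', hbt⟩ := List.exists_cons_of_ne_nil hne
        rw [hdrop, hbt, tailStr, hget, ← hbt]
        simp [String.append_assoc]

lemma tail_eq : ∀ (t : List String) (x y : String),
    tailStr (x :: y :: t) =
      PySem.Str.join ", " (x :: y :: t).dropLast ++ ", and " ++
        (x :: y :: t).getLast (by simp) := by
  intro t
  induction t with
  | nil =>
      intro x y
      have hj : PySem.Str.join ", " [x] = x := by
        rw [← String.toList_inj, PySem.Str.toList_join]
        simp [PySem.Chars.join_singleton]
      simp only [tailStr, List.dropLast, List.getLast, hj]
      rw [← String.toList_inj]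
      simp
  | cons z t ih =>
      intro x y
      have hj : PySem.Str.join ", " (x :: y :: (z :: t).dropLast) =
          x ++ ", " ++ PySem.Str.join ", " (y :: (z :: t).dropLast) := by
        rw [← String.toList_inj]
        simp [PySem.Str.toList_join, PySem.Chars.join_cons_cons]
      show x ++ ", " ++ tailStr (y :: z :: t) = _
      rw [ih y z]
      have hdl : (x :: y :: z :: t).dropLast = x :: y :: (z :: t).dropLast := rfl
      have hgl : (x :: y :: z :: t).getLast (by simp) = (y :: z :: t).getLast (by simp) :=
        List.getLast_cons (by simp)
      have hdl2 : (y :: z :: t).dropLast = y :: (z :: t).dropLast := rfl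
      rw [hdl, hgl, hj, hdl2]
      simp [String.append_assoc]

-- ===== VERDICT (by name: the statement is the Claim_ definition above) =====
theorem list2String_spec : Claim_equal_list2String := by
  intro inputList _
  unfold Spec_list2String
  match inputList with
  | [] => rfl
  | [x] =>
      show (PySem.List.pyRange 0 ((([x] : List String).length : Int)) 1).foldl _ "" = list2String_alt [x]
      rw [show ((([x] : List String).length : Int)) = 1 by simp,
        PySem.List.pyRange_one_cons (by norm_num), PySem.List.pyRange_one_eq_nil (by norm_num)]
      simp [PySem.List.pyGetD, PySem.List.pyGet?, PySem.List.pyIdx?, list2String_alt]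
  | x :: y :: t =>
      have h2 : 2 ≤ (x :: y :: t).length := by simp
      have := loopA (x :: y :: t) h2 0 "" (by omega)
      simp only [Nat.cast_zero] at this
      show (PySem.List.pyRange 0 ((x :: y :: t).length : Int) 1).foldl _ "" = _
      rw [this]
      simp only [List.drop_zero]
      rw [tail_eq]
      simp [list2String_alt]
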